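-- pv_equiv track=rewrite | github.com/roman000007/Sea-battle | field.py | field_to_str
-- ===== SOURCE A (Python) =====
-- def field_to_str(ships):
--     """
--     (arr of tuples) -> (string)
--     Convert battle field with ships to string
--     Return: string
--     """
--     field_str = ""
--     for i in range(10):
--         for j in range(10):
--             if (i, j) in ships:
--                 field_str += "*"
--             else:
--                 field_str += " "
--         field_str += "\n"
--     return field_str
-- ===== SOURCE B (Python) =====
-- def field_to_str(ships):
--     """
--     (arr of tuples) -> (string)
--     Convert battle field with ships to string
--     Return: string
--     """
--     grid = [[" "] * 10 for _ in range(10)]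
--     for i, j in ships:
--         if 0 <= i < 10 and 0 <= j < 10:
--             grid[i][j] = "*"
--     return "".join("".join(row) + "\n" for row in grid)
-- ===== Notes on version B (the rewrite author's own statement) =====
-- stated objective: faster
-- what changed: Instead of scanning the ships list once per cell (100 membership tests), B paints each in-range ship coordinate into a pre-built 10x10 character grid and joins the rows once.
import Mathlib
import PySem

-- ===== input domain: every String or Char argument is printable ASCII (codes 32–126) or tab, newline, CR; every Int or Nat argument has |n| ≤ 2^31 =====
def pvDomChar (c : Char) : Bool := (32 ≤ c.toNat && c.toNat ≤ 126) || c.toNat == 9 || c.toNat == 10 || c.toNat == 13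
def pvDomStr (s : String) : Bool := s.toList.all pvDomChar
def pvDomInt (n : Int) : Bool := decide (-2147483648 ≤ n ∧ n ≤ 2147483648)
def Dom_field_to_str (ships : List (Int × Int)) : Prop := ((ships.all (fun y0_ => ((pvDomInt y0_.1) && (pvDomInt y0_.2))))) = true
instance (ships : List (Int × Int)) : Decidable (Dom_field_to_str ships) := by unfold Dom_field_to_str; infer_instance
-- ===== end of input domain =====

-- B paints each in-range ship coordinate into a pre-built 10x10 grid instead of
-- scanning the ships list once per cell; return values are proved equal.

-- ===== PORT A =====
-- the string accumulator is carried as List Char (exact; Lean's String.append is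
-- opaque to the kernel) and wrapped with String.ofList at the end
def field_to_str (ships : List (Int × Int)) : String :=
  String.ofList <|
    (PySem.List.pyRange 0 10 1).foldl (fun field_str i =>
      ((PySem.List.pyRange 0 10 1).foldl (fun field_str j =>
        if ships.contains (i, j) then field_str ++ ['*'] else field_str ++ [' '])
        field_str) ++ ['\n']) []

-- ===== PORT B =====
-- grid[i][j] = "*" for one in-range ship (i, j)
def pvPlace (grid : List (List Char)) (s : Int × Int) : List (List Char) :=
  if 0 ≤ s.1 ∧ s.1 < 10 ∧ 0 ≤ s.2 ∧ s.2 < 10 then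
    grid.set s.1.toNat ((grid.getD s.1.toNat []).set s.2.toNat '*')
  else grid

def field_to_str_alt (ships : List (Int × Int)) : String :=
  let grid := ships.foldl pvPlace (List.replicate 10 (List.replicate 10 ' '))
  -- "".join("".join(row) + "\n" for row in grid), on chars
  String.ofList ((grid.map (fun row => row ++ ['\n'])).flatten)

-- ===== PRECONDITION & SPEC =====
def Spec_field_to_str (ships : List (Int × Int)) (out : String) : Prop := out = field_to_str_alt ships
instance (ships : List (Int × Int)) (out : String) : Decidable (Spec_field_to_str ships out) := by unfold Spec_field_to_str; infer_instance

-- ===== CLAIM (what is proved, stated in full; the proofs are below) =====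
def Claim_equal_field_to_str : Prop := ∀ (ships : List (Int × Int)), Dom_field_to_str ships → Spec_field_to_str ships (field_to_str ships)

-- ===== LEMMAS AND PROOFS =====

-- the canonical grid: cell (i, j) is '*' exactly where p (i, j) holds
def pvRow (p : Int × Int → Bool) (i : Nat) : List Char :=
  (List.range 10).map (fun (j : Nat) => if p (↑i, ↑j) then '*' else ' ')

def pvCG (p : Int × Int → Bool) : List (List Char) :=
  (List.range 10).map (fun i => pvRow p i)

theorem pvCG_congr (p q : Int × Int → Bool)
    (h : ∀ i j : Nat, i < 10 → j < 10 → p (↑i, ↑j) = q (↑i, ↑j)) :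
    pvCG p = pvCG q := by
  unfold pvCG pvRow
  apply List.map_congr_left
  intro i hi
  apply List.map_congr_left
  intro j hj
  rw [h i j (List.mem_range.mp hi) (List.mem_range.mp hj)]

theorem pvCG_length (p : Int × Int → Bool) : (pvCG p).length = 10 := by
  simp [pvCG]

theorem pvCG_getElem (p : Int × Int → Bool) (k : Nat) (hk : k < 10) :
    (pvCG p)[k]'(by rw [pvCG_length]; exact hk) = pvRow p k := by
  simp [pvCG]

theorem pvPlace_cg (p : Int × Int → Bool) (s : Int × Int) :
    pvPlace (pvCG p) s = pvCG (fun c => p c || (c == s)) := by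
  unfold pvPlace
  split_ifs with hr
  · obtain ⟨h1, h2, h3, h4⟩ := hr
    apply List.ext_getElem
    · simp [pvCG]
    · intro k hk _
      rw [List.length_set, pvCG_length] at hk
      rw [List.getElem_set]
      rw [pvCG_getElem (fun c => p c || (c == s)) k hk]
      split_ifs with hks
      · -- the replaced row
        subst hks
        have hrow : (pvCG p).getD s.1.toNat [] = pvRow p s.1.toNat := by
          rw [List.getD_eq_getElem _ _ (by rw [pvCG_length]; omega)]
          exact pvCG_getElem p s.1.toNat (by omega)
        rw [hrow]
        unfold pvRow
        apply List.ext_getElem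
        · simp
        · intro l hl _
          rw [List.length_set, List.length_map, List.length_range] at hl
          rw [List.getElem_set]
          simp only [List.getElem_map, List.getElem_range]
          by_cases hls : s.2.toNat = l
          · simp [hls]
            intro _
            exact Prod.ext_iff.mpr ⟨by omega, by omega⟩
          · have hne : ((max s.1 0 : Int), (l : Int)) ≠ s := by
              intro h
              exact hls (by have := Prod.ext_iff.mp h; omega)
            simp [hls, hne]
      · -- an untouched row
        rw [pvCG_getElem p k hk]
        unfold pvRow
        apply List.map_congr_left
        intro j _
        have hb : (((k : Int), (j : Int)) == s) = false := by
          rw [beq_eq_false_iff_ne]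
          intro h
          exact hks (by have := Prod.ext_iff.mp h; omega)
        simp [hb]
  · -- out-of-range ship: the grid is unchanged, and no in-range cell equals s
    apply pvCG_congr
    intro i j hi hj
    have hb : (((i : Int), (j : Int)) == s) = false := by
      rw [beq_eq_false_iff_ne]
      intro h
      obtain ⟨ha, hbb⟩ := Prod.ext_iff.mp h
      exact hr ⟨by omega, by omega, by omega, by omega⟩
    simp [hb]

theorem pvFoldl_place (ships : List (Int × Int)) :
    ∀ p : Int × Int → Bool,
      ships.foldl pvPlace (pvCG p) = pvCG (fun c => p c || ships.contains c) := by
  induction ships with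
  | nil =>
    intro p
    rw [List.foldl_nil]
    apply pvCG_congr
    intro i j _ _
    simp
  | cons s rest ih =>
    intro p
    rw [List.foldl_cons, pvPlace_cg, ih]
    apply pvCG_congr
    intro i j _ _
    simp only [List.contains_cons, Bool.or_assoc]

theorem pvInit_cg : List.replicate 10 (List.replicate 10 ' ') = pvCG (fun _ => false) := by
  decide

-- A's nested fold produces exactly the canonical grid, flattened with newlines
theorem pvA_eq (ships : List (Int × Int)) :
    field_to_str ships =
      String.ofList (((pvCG (fun c => ships.contains c)).map (fun row => row ++ ['\n'])).flatten) := by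
  unfold field_to_str
  have hrow : ∀ (i : Int) (acc : List Char),
      (PySem.List.pyRange 0 10 1).foldl (fun field_str j =>
        if ships.contains (i, j) then field_str ++ ['*'] else field_str ++ [' ']) acc =
      acc ++ (PySem.List.pyRange 0 10 1).map
        (fun j => if ships.contains (i, j) then '*' else ' ') := by
    intro i acc
    have hstep : (fun (field_str : List Char) (j : Int) =>
        if ships.contains (i, j) then field_str ++ ['*'] else field_str ++ [' ']) =
        (fun field_str j => field_str ++ [if ships.contains (i, j) then '*' else ' ']) := by
      funext fs j
      by_cases h : (i, j) ∈ ships <;> simp [h]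
    rw [hstep, PySem.List.foldl_append_singleton_eq_map]
  have houter : (fun (field_str : List Char) (i : Int) =>
      ((PySem.List.pyRange 0 10 1).foldl (fun field_str j =>
        if ships.contains (i, j) then field_str ++ ['*'] else field_str ++ [' '])
        field_str) ++ ['\n']) =
      (fun field_str i => field_str ++
        ((PySem.List.pyRange 0 10 1).map
          (fun j => if ships.contains (i, j) then '*' else ' ') ++ ['\n'])) := by
    funext fs i
    rw [hrow, List.append_assoc]
  rw [houter, PySem.List.foldl_append_eq_flatMap]
  have h10 : (10 : Int) = ((10 : Nat) : Int) := by norm_num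
  rw [h10, PySem.List.pyRange_zero_nat]
  congr 1

theorem field_to_str_eq_alt (ships : List (Int × Int)) :
    field_to_str ships = field_to_str_alt ships := by
  rw [pvA_eq]
  unfold field_to_str_alt
  rw [pvInit_cg, pvFoldl_place]
  have h : (fun c => false || ships.contains c) = (fun c => ships.contains c) := by
    funext c; simp
  rw [h]

-- ===== VERDICT (by name: the statement is the Claim_ definition above) =====
theorem field_to_str_spec : Claim_equal_field_to_str := by
  intro ships _
  exact field_to_str_eq_alt ships
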